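-- pv_equiv track=rewrite | github.com/GiliWolf/HE_scripts | parallel_detection.py | get_read_blocks
-- ===== SOURCE A (Python) =====
-- def get_read_blocks(genomic_blocks):
--     read_blocks = []
--     offset = 0
--     for block in genomic_blocks:
--         end = offset + (block[1] - block[0]) - 1
--         read_blocks.append((offset, end))
--         offset = end + 1
--     return read_blocks
-- ===== SOURCE B (Python) =====
-- def get_read_blocks(genomic_blocks):
--     lengths = [b[1] - b[0] for b in genomic_blocks]
--     offsets = [0]
--     for l in lengths:
--         offsets.append(offsets[-1] + l)
--     return [(o, o + l - 1) for o, l in zip(offsets, lengths)]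
-- ===== Notes on version B (the rewrite author's own statement) =====
-- stated objective: alternative
-- what changed: Replaces the single running-offset accumulator loop that appends (offset,end) pairs by a two-stage pipeline: extract block lengths, build a prefix-sum offsets table, then zip offsets with lengths into (o, o+l-1) pairs.
import Mathlib
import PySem

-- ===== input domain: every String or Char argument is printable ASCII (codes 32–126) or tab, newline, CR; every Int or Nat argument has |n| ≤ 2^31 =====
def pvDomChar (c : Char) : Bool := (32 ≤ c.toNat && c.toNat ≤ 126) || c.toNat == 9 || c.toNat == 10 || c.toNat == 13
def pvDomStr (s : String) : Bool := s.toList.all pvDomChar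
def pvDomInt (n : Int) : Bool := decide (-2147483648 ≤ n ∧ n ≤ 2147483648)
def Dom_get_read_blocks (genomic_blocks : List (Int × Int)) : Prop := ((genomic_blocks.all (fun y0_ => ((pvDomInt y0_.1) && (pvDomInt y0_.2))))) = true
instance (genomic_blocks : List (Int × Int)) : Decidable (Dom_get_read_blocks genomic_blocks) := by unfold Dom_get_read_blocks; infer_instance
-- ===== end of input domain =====

-- B replaces A's running-offset accumulator loop by a lengths → prefix-sum offsets → zip pipeline (alternative decomposition, same cost).


-- ===== PORT A =====
-- literal port of A: one loop carrying (read_blocks, offset)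
def get_read_blocks (genomic_blocks : List (Int × Int)) : List (Int × Int) :=
  (genomic_blocks.foldl
    (fun (st : List (Int × Int) × Int) block =>
      let e := st.2 + (block.2 - block.1) - 1
      (st.1 ++ [(st.2, e)], e + 1))
    ([], 0)).1

-- ===== PORT B =====
-- literal port of Source B: lengths, then offsets prefix-sum list (appending offsets[-1] + l), then zip
def get_read_blocks_alt (genomic_blocks : List (Int × Int)) : List (Int × Int) :=
  let lengths := genomic_blocks.map (fun b => b.2 - b.1)
  let offsets := lengths.foldl (fun acc l => acc ++ [acc.getLastD 0 + l]) [0]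
  (offsets.zip lengths).map (fun p => (p.1, p.1 + p.2 - 1))

-- ===== PRECONDITION & SPEC =====
def Spec_get_read_blocks (genomic_blocks : List (Int × Int)) (out : List (Int × Int)) : Prop := out = get_read_blocks_alt genomic_blocks
instance (genomic_blocks : List (Int × Int)) (out : List (Int × Int)) : Decidable (Spec_get_read_blocks genomic_blocks out) := by unfold Spec_get_read_blocks; infer_instance

-- ===== CLAIM (what is proved, stated in full; the proofs are below) =====
def Claim_equal_get_read_blocks : Prop := ∀ (genomic_blocks : List (Int × Int)), Dom_get_read_blocks genomic_blocks → Spec_get_read_blocks genomic_blocks (get_read_blocks genomic_blocks)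

-- ===== LEMMAS AND PROOFS =====

-- reference recursion: the blocks produced starting from offset `off`
def pvMk (off : Int) : List (Int × Int) → List (Int × Int)
  | [] => []
  | b :: t => (off, off + (b.2 - b.1) - 1) :: pvMk (off + (b.2 - b.1)) t

-- A's loop, generalized
theorem pvA_loop (gb : List (Int × Int)) : ∀ (acc : List (Int × Int)) (off : Int),
    (gb.foldl (fun (st : List (Int × Int) × Int) block =>
      let e := st.2 + (block.2 - block.1) - 1
      (st.1 ++ [(st.2, e)], e + 1)) (acc, off)).1 = acc ++ pvMk off gb := by
  induction gb with
  | nil => intro acc off; simp [pvMk]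
  | cons b t ih =>
    intro acc off
    simp only [List.foldl_cons, pvMk, ih]
    have : off + (b.2 - b.1) - 1 + 1 = off + (b.2 - b.1) := by ring
    simp [this]

-- reference prefix sums starting at x
def pvSums (x : Int) : List Int → List Int
  | [] => [x]
  | l :: t => x :: pvSums (x + l) t

-- B's offsets loop, generalized
theorem pvB_loop (ls : List Int) : ∀ (acc : List Int) (x : Int),
    (ls.foldl (fun acc l => acc ++ [acc.getLastD 0 + l]) (acc ++ [x])) = acc ++ pvSums x ls := by
  induction ls with
  | nil => intro acc x; simp [pvSums]
  | cons l t ih =>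
    intro acc x
    simp only [List.foldl_cons, pvSums]
    have h : (acc ++ [x]).getLastD 0 = x := by simp
    rw [h]
    have h2 : acc ++ [x] ++ [x + l] = (acc ++ [x]) ++ [x + l] := by simp
    rw [h2, ih (acc ++ [x]) (x + l)]
    simp

-- zipping prefix sums with lengths gives pvMk
theorem pvZip_mk (gb : List (Int × Int)) : ∀ (off : Int),
    ((pvSums off (gb.map (fun b => b.2 - b.1))).zip (gb.map (fun b => b.2 - b.1))).map
      (fun p => (p.1, p.1 + p.2 - 1)) = pvMk off gb := by
  induction gb with
  | nil => intro off; simp [pvSums, pvMk]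
  | cons b t ih =>
    intro off
    simp only [List.map_cons, pvSums, List.zip_cons_cons, pvMk, ih]

theorem pv_eq (gb : List (Int × Int)) : get_read_blocks gb = get_read_blocks_alt gb := by
  unfold get_read_blocks get_read_blocks_alt
  have hB := pvB_loop (gb.map (fun b => b.2 - b.1)) [] 0
  simp only [List.nil_append] at hB
  simp only [hB, pvA_loop gb [] 0, List.nil_append, pvZip_mk]

-- ===== VERDICT (by name: the statement is the Claim_ definition above) =====
theorem get_read_blocks_spec : Claim_equal_get_read_blocks := by
  intro gb _
  exact pv_eq gb
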